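-- pv_equiv track=rewrite | github.com/Lyce24/RubiksCube-TwophaseSolver | entropy.py | convert_to_move
-- ===== SOURCE A (Python) =====
-- def convert_to_move(s):
--     move_list = s.split(' ')
--     ret_list = []
--     for i in move_list:
--         if i == 'U':
--             ret_list.append(0)
--         elif i == 'U2':
--             ret_list.append(1)
--         elif i == "U'":
--             ret_list.append(2)
--         elif i == 'R':
--             ret_list.append(3)
--         elif i == 'R2':
--             ret_list.append(4)
--         elif i == "R'":
--             ret_list.append(5)
--         elif i == 'F':
--             ret_list.append(6)
--         elif i == 'F2':
--             ret_list.append(7)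
--         elif i == "F'":
--             ret_list.append(8)
--         elif i == 'D':
--             ret_list.append(9)
--         elif i == 'D2':
--             ret_list.append(10)
--         elif i == "D'":
--             ret_list.append(11)
--         elif i == 'L':
--             ret_list.append(12)
--         elif i == 'L2':
--             ret_list.append(13)
--         elif i == "L'":
--             ret_list.append(14)
--         elif i == 'B':
--             ret_list.append(15)
--         elif i == 'B2':
--             ret_list.append(16)
--         elif i == "B'":
--             ret_list.append(17)
--     return ret_list
-- ===== SOURCE B (Python) =====
-- FACES = {'U': 0, 'R': 1, 'F': 2, 'D': 3, 'L': 4, 'B': 5}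
-- MODS = {'': 0, '2': 1, "'": 2}
--
-- def convert_to_move(s):
--     out = []
--     for tok in s.split(' '):
--         f = FACES.get(tok[:1])
--         m = MODS.get(tok[1:])
--         if f is not None and m is not None:
--             out.append(3 * f + m)
--     return out
-- ===== Notes on version B (the rewrite author's own statement) =====
-- stated objective: simpler
-- what changed: Replaces the 18-branch elif chain with two small tables (face letter, suffix modifier) looked up on token[:1] and token[1:] and combined as 3*face+modifier, skipping tokens where either lookup misses.
import Mathlib
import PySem

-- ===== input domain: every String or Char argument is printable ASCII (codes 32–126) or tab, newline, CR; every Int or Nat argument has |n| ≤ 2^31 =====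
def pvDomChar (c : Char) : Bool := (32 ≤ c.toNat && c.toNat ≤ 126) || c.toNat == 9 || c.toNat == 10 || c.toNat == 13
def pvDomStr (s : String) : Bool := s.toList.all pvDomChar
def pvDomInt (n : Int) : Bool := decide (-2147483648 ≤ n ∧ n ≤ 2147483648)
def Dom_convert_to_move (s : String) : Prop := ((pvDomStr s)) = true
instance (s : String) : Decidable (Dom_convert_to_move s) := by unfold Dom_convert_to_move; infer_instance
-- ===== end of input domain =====

-- B replaces A's 18-branch elif chain by two small tables (face, modifier) combined arithmetically; objective: simpler.

-- ===== PORT A =====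
-- the loop body of A: the 18-way elif chain appending to ret_list
def cmStepA (acc : List Int) (i : String) : List Int :=
  if i = "U" then acc ++ [0]
  else if i = "U2" then acc ++ [1]
  else if i = "U'" then acc ++ [2]
  else if i = "R" then acc ++ [3]
  else if i = "R2" then acc ++ [4]
  else if i = "R'" then acc ++ [5]
  else if i = "F" then acc ++ [6]
  else if i = "F2" then acc ++ [7]
  else if i = "F'" then acc ++ [8]
  else if i = "D" then acc ++ [9]
  else if i = "D2" then acc ++ [10]
  else if i = "D'" then acc ++ [11]
  else if i = "L" then acc ++ [12]
  else if i = "L2" then acc ++ [13]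
  else if i = "L'" then acc ++ [14]
  else if i = "B" then acc ++ [15]
  else if i = "B2" then acc ++ [16]
  else if i = "B'" then acc ++ [17]
  else acc

def convert_to_move (s : String) : List Int :=
  ((PySem.Str.split? s " ").getD []).foldl cmStepA []
  -- split? is some here since the separator " " is nonempty; getD [] only discharges the option

-- ===== PORT B =====
def cmFaces : PySem.Dict String Int :=
  PySem.Dict.ofList [("U",0),("R",1),("F",2),("D",3),("L",4),("B",5)]
def cmMods : PySem.Dict String Int :=
  PySem.Dict.ofList [("",0),("2",1),("'",2)]

-- the loop body of B: look up tok[:1] and tok[1:] and combine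
def cmStepB (acc : List Int) (tok : String) : List Int :=
  match cmFaces.get? (PySem.Str.slice tok none (some 1)),
        cmMods.get? (PySem.Str.slice tok (some 1) none) with
  | some f, some m => acc ++ [3 * f + m]
  | _, _ => acc

def convert_to_move_alt (s : String) : List Int :=
  ((PySem.Str.split? s " ").getD []).foldl cmStepB []

-- ===== PRECONDITION & SPEC =====
def Spec_convert_to_move (s : String) (out : List Int) : Prop := out = convert_to_move_alt s
instance (s : String) (out : List Int) : Decidable (Spec_convert_to_move s out) := by unfold Spec_convert_to_move; infer_instance

-- ===== CLAIM (what is proved, stated in full; the proofs are below) =====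
def Claim_equal_convert_to_move : Prop := ∀ (s : String), Dom_convert_to_move s → Spec_convert_to_move s (convert_to_move s)

-- ===== LEMMAS AND PROOFS =====

-- tok is its first character glued to its rest
lemma cm_slice_split (tok : String) :
    (PySem.Str.slice tok none (some 1)).toList ++ (PySem.Str.slice tok (some 1) none).toList = tok.toList := by
  rw [PySem.Str.toList_slice, PySem.Str.toList_slice, PySem.Chars.slice_eq_listSlice,
    PySem.Chars.slice_eq_listSlice, PySem.List.slice_to tok.toList (by norm_num),
    PySem.List.slice_from tok.toList (by norm_num), List.take_append_drop]

lemma cm_faces_mem (k : String) (f : Int) (h : cmFaces.get? k = some f) :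
    k = "U" ∨ k = "R" ∨ k = "F" ∨ k = "D" ∨ k = "L" ∨ k = "B" := by
  have e : cmFaces = PySem.Dict.mk [("U",0),("R",1),("F",2),("D",3),("L",4),("B",5)] := by decide
  rw [e] at h
  simp only [PySem.Dict.get?_mk_cons, beq_iff_eq] at h
  split_ifs at h <;> tauto

lemma cm_mods_mem (k : String) (m : Int) (h : cmMods.get? k = some m) :
    k = "" ∨ k = "2" ∨ k = "'" := by
  have e : cmMods = PySem.Dict.mk [("",0),("2",1),("'",2)] := by decide
  rw [e] at h
  simp only [PySem.Dict.get?_mk_cons, beq_iff_eq] at h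
  split_ifs at h <;> tauto

lemma cm_step_eq (acc : List Int) (tok : String) : cmStepA acc tok = cmStepB acc tok := by
  by_cases h1 : tok = "U"
  · subst h1
    have hf : cmFaces.get? (PySem.Str.slice "U" none (some 1)) = some 0 := by decide
    have hm : cmMods.get? (PySem.Str.slice "U" (some 1) none) = some 0 := by decide
    simp [cmStepA, cmStepB, hf, hm]
  by_cases h2 : tok = "U2"
  · subst h2
    have hf : cmFaces.get? (PySem.Str.slice "U2" none (some 1)) = some 0 := by decide
    have hm : cmMods.get? (PySem.Str.slice "U2" (some 1) none) = some 1 := by decide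
    simp [cmStepA, cmStepB, hf, hm]
  by_cases h3 : tok = "U'"
  · subst h3
    have hf : cmFaces.get? (PySem.Str.slice "U'" none (some 1)) = some 0 := by decide
    have hm : cmMods.get? (PySem.Str.slice "U'" (some 1) none) = some 2 := by decide
    simp [cmStepA, cmStepB, hf, hm]
  by_cases h4 : tok = "R"
  · subst h4
    have hf : cmFaces.get? (PySem.Str.slice "R" none (some 1)) = some 1 := by decide
    have hm : cmMods.get? (PySem.Str.slice "R" (some 1) none) = some 0 := by decide
    simp [cmStepA, cmStepB, hf, hm]
  by_cases h5 : tok = "R2"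
  · subst h5
    have hf : cmFaces.get? (PySem.Str.slice "R2" none (some 1)) = some 1 := by decide
    have hm : cmMods.get? (PySem.Str.slice "R2" (some 1) none) = some 1 := by decide
    simp [cmStepA, cmStepB, hf, hm]
  by_cases h6 : tok = "R'"
  · subst h6
    have hf : cmFaces.get? (PySem.Str.slice "R'" none (some 1)) = some 1 := by decide
    have hm : cmMods.get? (PySem.Str.slice "R'" (some 1) none) = some 2 := by decide
    simp [cmStepA, cmStepB, hf, hm]
  by_cases h7 : tok = "F"
  · subst h7
    have hf : cmFaces.get? (PySem.Str.slice "F" none (some 1)) = some 2 := by decide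
    have hm : cmMods.get? (PySem.Str.slice "F" (some 1) none) = some 0 := by decide
    simp [cmStepA, cmStepB, hf, hm]
  by_cases h8 : tok = "F2"
  · subst h8
    have hf : cmFaces.get? (PySem.Str.slice "F2" none (some 1)) = some 2 := by decide
    have hm : cmMods.get? (PySem.Str.slice "F2" (some 1) none) = some 1 := by decide
    simp [cmStepA, cmStepB, hf, hm]
  by_cases h9 : tok = "F'"
  · subst h9
    have hf : cmFaces.get? (PySem.Str.slice "F'" none (some 1)) = some 2 := by decide
    have hm : cmMods.get? (PySem.Str.slice "F'" (some 1) none) = some 2 := by decide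
    simp [cmStepA, cmStepB, hf, hm]
  by_cases h10 : tok = "D"
  · subst h10
    have hf : cmFaces.get? (PySem.Str.slice "D" none (some 1)) = some 3 := by decide
    have hm : cmMods.get? (PySem.Str.slice "D" (some 1) none) = some 0 := by decide
    simp [cmStepA, cmStepB, hf, hm]
  by_cases h11 : tok = "D2"
  · subst h11
    have hf : cmFaces.get? (PySem.Str.slice "D2" none (some 1)) = some 3 := by decide
    have hm : cmMods.get? (PySem.Str.slice "D2" (some 1) none) = some 1 := by decide
    simp [cmStepA, cmStepB, hf, hm]
  by_cases h12 : tok = "D'"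
  · subst h12
    have hf : cmFaces.get? (PySem.Str.slice "D'" none (some 1)) = some 3 := by decide
    have hm : cmMods.get? (PySem.Str.slice "D'" (some 1) none) = some 2 := by decide
    simp [cmStepA, cmStepB, hf, hm]
  by_cases h13 : tok = "L"
  · subst h13
    have hf : cmFaces.get? (PySem.Str.slice "L" none (some 1)) = some 4 := by decide
    have hm : cmMods.get? (PySem.Str.slice "L" (some 1) none) = some 0 := by decide
    simp [cmStepA, cmStepB, hf, hm]
  by_cases h14 : tok = "L2"
  · subst h14
    have hf : cmFaces.get? (PySem.Str.slice "L2" none (some 1)) = some 4 := by decide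
    have hm : cmMods.get? (PySem.Str.slice "L2" (some 1) none) = some 1 := by decide
    simp [cmStepA, cmStepB, hf, hm]
  by_cases h15 : tok = "L'"
  · subst h15
    have hf : cmFaces.get? (PySem.Str.slice "L'" none (some 1)) = some 4 := by decide
    have hm : cmMods.get? (PySem.Str.slice "L'" (some 1) none) = some 2 := by decide
    simp [cmStepA, cmStepB, hf, hm]
  by_cases h16 : tok = "B"
  · subst h16
    have hf : cmFaces.get? (PySem.Str.slice "B" none (some 1)) = some 5 := by decide
    have hm : cmMods.get? (PySem.Str.slice "B" (some 1) none) = some 0 := by decide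
    simp [cmStepA, cmStepB, hf, hm]
  by_cases h17 : tok = "B2"
  · subst h17
    have hf : cmFaces.get? (PySem.Str.slice "B2" none (some 1)) = some 5 := by decide
    have hm : cmMods.get? (PySem.Str.slice "B2" (some 1) none) = some 1 := by decide
    simp [cmStepA, cmStepB, hf, hm]
  by_cases h18 : tok = "B'"
  · subst h18
    have hf : cmFaces.get? (PySem.Str.slice "B'" none (some 1)) = some 5 := by decide
    have hm : cmMods.get? (PySem.Str.slice "B'" (some 1) none) = some 2 := by decide
    simp [cmStepA, cmStepB, hf, hm]
  simp only [cmStepA, if_neg h1, if_neg h2, if_neg h3, if_neg h4, if_neg h5, if_neg h6, if_neg h7, if_neg h8, if_neg h9, if_neg h10, if_neg h11, if_neg h12, if_neg h13, if_neg h14, if_neg h15, if_neg h16, if_neg h17, if_neg h18]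
  rcases hf : cmFaces.get? (PySem.Str.slice tok none (some 1)) with _ | f
  · simp [cmStepB, hf]
  rcases hm : cmMods.get? (PySem.Str.slice tok (some 1) none) with _ | m
  · simp [cmStepB, hf, hm]
  exfalso
  have ht := cm_slice_split tok
  rcases cm_faces_mem _ _ hf with hP|hP|hP|hP|hP|hP <;> rcases cm_mods_mem _ _ hm with hQ|hQ|hQ <;>
    · rw [hP, hQ] at ht
      have h2 := congrArg String.ofList ht
      simp at h2
      simp_all

lemma cm_fold_eq (l : List String) (acc : List Int) : l.foldl cmStepA acc = l.foldl cmStepB acc := by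
  induction l generalizing acc with
  | nil => rfl
  | cons x xs ih => simp only [List.foldl_cons, cm_step_eq, ih]

-- ===== VERDICT (by name: the statement is the Claim_ definition above) =====
theorem convert_to_move_spec : Claim_equal_convert_to_move := by
  intro s _
  unfold Spec_convert_to_move convert_to_move convert_to_move_alt
  exact cm_fold_eq _ _
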